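-- pv_equiv track=rewrite | github.com/spartan289/PycharmProjects | leetcpde/n.py | minop
-- ===== SOURCE A (Python) =====
-- def minop(n):
--     op = 0
--     while n!=0:
--         y = n
--         if len(str(y))==1:
--             op+=1
--             break
--         y = [int(x) for x in str(y)]
--         m1 = max(y)
--         n = n-m1
--         op+=1
--     return op
-- ===== SOURCE B (Python) =====
-- def minop(n):
--     # Decade batching: instead of simulating every single subtraction, process one
--     # decade (block of ten) per iteration, computing the number of steps spent in it
--     # arithmetically with a division.
--     if n == 0:
--         return 0
--     op = 0
--     h, d = divmod(n, 10)
--     while h > 0: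
--         # M = max digit of the high part h (fixed for the whole decade)
--         M = 0
--         t = h
--         while t:
--             if t % 10 > M:
--                 M = t % 10
--             t //= 10
--         if d > M:
--             # one step subtracting d itself lands on the decade's multiple of 10
--             op += 1
--             d = 0
--         # k steps of subtracting M cross into decade h-1
--         k = d // M + 1
--         op += k
--         d = d - k * M + 10
--         h -= 1
--     return op + 1
-- ===== Notes on version B (the rewrite author's own statement) =====
-- stated objective: faster
-- what changed: B batches each decade: instead of simulating every single subtraction, it computes with one division how many steps subtracting the (fixed) max digit of the high part takes to cross into the next lower decade, so it does one O(1)-arithmetic iteration per decade instead of per subtraction.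
import Mathlib
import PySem

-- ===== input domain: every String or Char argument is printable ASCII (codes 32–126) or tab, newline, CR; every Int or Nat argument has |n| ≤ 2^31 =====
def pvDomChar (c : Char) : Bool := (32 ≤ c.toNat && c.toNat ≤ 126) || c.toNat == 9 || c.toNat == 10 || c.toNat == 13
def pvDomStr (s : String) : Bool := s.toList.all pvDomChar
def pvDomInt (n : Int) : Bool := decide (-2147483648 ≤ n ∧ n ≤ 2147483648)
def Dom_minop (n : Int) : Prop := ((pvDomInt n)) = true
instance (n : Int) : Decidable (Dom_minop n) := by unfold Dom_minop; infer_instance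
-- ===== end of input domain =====

-- B batches whole decades: one division computes how many max-digit subtractions cross into
-- the next lower decade, one iteration per decade instead of per subtraction (measured faster).

-- ===== PORT A =====
-- while loop ported as fuel recursion on the pair (n, op); fuel n.natAbs + 1 is enough
-- because each iteration with n ≥ 10 decreases n by at least 1 and n ≤ 9 ends the loop.
def minopLoop : Nat → Int → Int → Int
  | 0, _, op => op
  | fuel + 1, n, op =>
    if n ≠ 0 then
      let y := n
      if PySem.Str.len (PySem.Int.toStr y) = 1 then
        op + 1
      else
        -- iterating str(y) yields 1-char strings; int(x) is PySem.Int.ofChars? [c]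
        -- (none = ValueError, excluded by Pre_; .getD 0 is never the raising case inside Pre_)
        let ds := (PySem.Int.toStr y).toList.map (fun c => (PySem.Int.ofChars? [c]).getD 0)
        let m1 := (PySem.List.max? ds (fun v => v)).getD 0
        minopLoop fuel (n - m1) (op + 1)
    else op

def minop (n : Int) : Int := minopLoop (n.natAbs + 1) n 0

-- ===== PORT B =====
-- inner 'while t:' of Source B (max digit of t); fuel t.natAbs covers the digit count
def maxDigitLoop : Nat → Int → Int → Int
  | 0, m, _ => m
  | fuel + 1, m, t =>
    if t ≠ 0 then
      maxDigitLoop fuel (if m < PySem.Int.mod t 10 then PySem.Int.mod t 10 else m)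
        (PySem.Int.floordiv t 10)
    else m

-- outer 'while h > 0' of Source B; the loop decrements h by exactly 1, so fuel h.natAbs suffices
def altLoop : Nat → Int → Int → Int → Int
  | 0, _, _, op => op
  | fuel + 1, h, d, op =>
    if 0 < h then
      let M := maxDigitLoop h.natAbs 0 h
      let p := if M < d then ((0 : Int), op + 1) else (d, op)
      let k := PySem.Int.floordiv p.1 M + 1
      altLoop fuel (h - 1) (p.1 - k * M + 10) (p.2 + k)
    else op

def minop_alt (n : Int) : Int :=
  if n = 0 then 0
  else
    let h := PySem.Int.floordiv n 10
    let d := PySem.Int.mod n 10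
    altLoop h.natAbs h d 0 + 1

-- ===== PRECONDITION & SPEC =====
-- Pre_ excludes exactly the negative inputs, on which A raises ValueError
-- (int('-') inside the list comprehension).
def Pre_minop (n : Int) : Prop := 0 ≤ n
instance (n : Int) : Decidable (Pre_minop n) := by unfold Pre_minop; infer_instance
def pvWitness_minop : Int := (37)

def Spec_minop (n : Int) (out : Int) : Prop := out = minop_alt n
instance (n : Int) (out : Int) : Decidable (Spec_minop n out) := by unfold Spec_minop; infer_instance

-- ===== CLAIM (what is proved, stated in full; the proofs are below) =====
def Claim_equal_minop : Prop := ∀ (n : Int), Dom_minop n → Pre_minop n → Spec_minop n (minop n)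

-- ===== LEMMAS AND PROOFS =====

-- the max digit of a natural number (0 for 0)
def mnat (m : Nat) : Nat := (Nat.digits 10 m).foldl max 0

theorem foldl_max_shift {α : Type} [LinearOrder α] (l : List α) (a b : α) :
    l.foldl max (max a b) = max (l.foldl max a) b := by
  induction l generalizing a with
  | nil => rfl
  | cons x t ih =>
    simp only [List.foldl_cons]
    rw [max_right_comm a b x]
    exact ih (max a x)

theorem foldl_max_rev {α : Type} [LinearOrder α] (l : List α) (a : α) :
    l.reverse.foldl max a = l.foldl max a := by
  induction l generalizing a with
  | nil => rfl
  | cons x t ih =>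
    simp only [List.reverse_cons, List.foldl_append, List.foldl_cons, List.foldl_nil, ih]
    rw [← foldl_max_shift]

theorem init_le_foldl_max (l : List Nat) (a : Nat) : a ≤ l.foldl max a := by
  induction l generalizing a with
  | nil => exact le_rfl
  | cons y t ih => exact le_trans (le_max_left a y) (ih (max a y))

theorem le_foldl_max_nat : ∀ (l : List Nat) (a x : Nat), x ∈ l → x ≤ l.foldl max a := by
  intro l
  induction l with
  | nil => intro a x hx; cases hx
  | cons y t ih =>
    intro a x hx
    rcases List.mem_cons.mp hx with h | h
    · subst h
      exact le_trans (le_max_right a x) (init_le_foldl_max t _)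
    · exact ih _ _ h

theorem foldl_max_le_nat (l : List Nat) (a b : Nat) (ha : a ≤ b)
    (h : ∀ x ∈ l, x ≤ b) : l.foldl max a ≤ b := by
  induction l generalizing a with
  | nil => exact ha
  | cons y t ih =>
    exact ih _ (max_le ha (h y (List.mem_cons_self))) (fun x hx => h x (List.mem_cons_of_mem _ hx))

theorem mnat_le_nine (m : Nat) : mnat m ≤ 9 := by
  refine foldl_max_le_nat _ _ _ (by omega) (fun x hx => ?_)
  have := Nat.digits_lt_base (by norm_num) hx
  omega

theorem one_le_mnat (m : Nat) (h : m ≠ 0) : 1 ≤ mnat m := by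
  have hne : Nat.digits 10 m ≠ [] := Nat.digits_ne_nil_iff_ne_zero.mpr h
  have hlast := Nat.getLast_digit_ne_zero 10 h
  have hmem : (Nat.digits 10 m).getLast hne ∈ Nat.digits 10 m := List.getLast_mem hne
  have := le_foldl_max_nat _ 0 _ hmem
  unfold mnat
  omega

-- the reference step-count function
def fRef (n : Int) : Int :=
  if _h0 : n ≤ 0 then 0
  else if _h1 : n < 10 then 1
  else 1 + fRef (n - (mnat n.toNat : Int))
termination_by n.toNat
decreasing_by
  have h1 : 1 ≤ mnat n.toNat := one_le_mnat _ (by omega)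
  have h2 : mnat n.toNat ≤ 9 := mnat_le_nine n.toNat
  omega

theorem castfold (l : List Nat) (a : Nat) :
    (l.map (fun d : Nat => (d : Int))).foldl max ((a : Nat) : Int) = ((l.foldl max a : Nat) : Int) := by
  induction l generalizing a with
  | nil => rfl
  | cons x t ih =>
    simp only [List.map_cons, List.foldl_cons, ← Nat.cast_max]
    exact ih (max a x)

theorem toDigitsCore_eq (f : Nat) : ∀ (m : Nat) (l : List Char), 0 < m → m ≤ f →
    Nat.toDigitsCore 10 f m l = ((Nat.digits 10 m).map Nat.digitChar).reverse ++ l := by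
  induction f with
  | zero => intro m l h1 h2; omega
  | succ f ih =>
    intro m l h1 h2
    rw [Nat.toDigitsCore]
    by_cases hq : m / 10 = 0
    · rw [if_pos hq]
      rw [Nat.digits_def' (by norm_num) h1, hq, Nat.digits_zero]
      simp
    · rw [if_neg hq]
      rw [ih (m / 10) _ (Nat.pos_of_ne_zero hq)
        (by have := Nat.div_lt_self h1 (by norm_num : 1 < 10); omega)]
      rw [Nat.digits_def' (by norm_num) h1]
      simp

theorem chars_eq (n : Int) (h : 0 < n) :
    (PySem.Int.toStr n).toList = ((Nat.digits 10 n.toNat).map Nat.digitChar).reverse := by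
  rw [PySem.Int.toList_toStr]
  unfold PySem.Int.toChars
  rw [if_neg (by omega)]
  unfold Nat.toDigits
  rw [toDigitsCore_eq (n.toNat + 1) n.toNat [] (by omega) (by omega)]
  simp

theorem parse_digitChar (d : Nat) (hd : d < 10) :
    (PySem.Int.ofChars? [Nat.digitChar d]).getD 0 = (d : Int) := by
  interval_cases d <;> decide

theorem len_toStr (n : Int) (h : 0 < n) :
    PySem.Str.len (PySem.Int.toStr n) = ((Nat.digits 10 n.toNat).length : Int) := by
  rw [PySem.Str.len_eq, chars_eq n h]
  simp

theorem len_one_iff (n : Int) (h : 0 < n) :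
    PySem.Str.len (PySem.Int.toStr n) = 1 ↔ n < 10 := by
  rw [len_toStr n h]
  have hne : n.toNat ≠ 0 := by omega
  rw [Nat.length_digits 10 n.toNat (by norm_num) hne]
  constructor
  · intro hl
    have hz : Nat.log 10 n.toNat = 0 := by omega
    rcases Nat.log_eq_zero_iff.mp hz with h' | h'
    · omega
    · omega
  · intro hl
    have hz : Nat.log 10 n.toNat = 0 := Nat.log_eq_zero_iff.mpr (Or.inl (by omega))
    omega

theorem m1_eq (n : Int) (h : 0 < n) :
    ((PySem.List.max? ((PySem.Int.toStr n).toList.map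
        (fun c => (PySem.Int.ofChars? [c]).getD 0)) (fun v => v)).getD 0)
      = ((mnat n.toNat : Nat) : Int) := by
  rw [chars_eq n h, List.map_reverse, List.map_map]
  have hds : ((Nat.digits 10 n.toNat).map
      ((fun c => (PySem.Int.ofChars? [c]).getD 0) ∘ Nat.digitChar))
      = (Nat.digits 10 n.toNat).map (fun d : Nat => (d : Int)) := by
    apply List.map_congr_left
    intro d hd
    exact parse_digitChar d (Nat.digits_lt_base (by norm_num) hd)
  rw [hds]
  have hne : Nat.digits 10 n.toNat ≠ [] := Nat.digits_ne_nil_iff_ne_zero.mpr (by omega)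
  obtain ⟨c, t, ht⟩ : ∃ c t, (Nat.digits 10 n.toNat).reverse = c :: t := by
    cases hr : (Nat.digits 10 n.toNat).reverse with
    | nil => exact absurd (by simpa using congrArg List.reverse hr) hne
    | cons c t => exact ⟨c, t, rfl⟩
  rw [← List.map_reverse, ht]
  simp only [List.map_cons, PySem.List.max?_id_cons, Option.getD_some]
  rw [show ((c : Nat) : Int) = ((max 0 c : Nat) : Int) by simp, castfold]
  have h1 : mnat n.toNat = (c :: t).foldl max 0 := by
    unfold mnat
    conv_lhs => rw [← foldl_max_rev]
    rw [ht]
  rw [h1]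
  simp [List.foldl_cons]

theorem lemA : ∀ (fuel : Nat) (n op : Int), 0 ≤ n → n.toNat < fuel →
    minopLoop fuel n op = op + fRef n := by
  intro fuel
  induction fuel with
  | zero => intro n op h0 hf; omega
  | succ fuel ih =>
    intro n op h0 hf
    by_cases hn : n = 0
    · subst hn
      rw [minopLoop, if_neg (by simp), fRef]
      simp
    · have hnp : 0 < n := lt_of_le_of_ne h0 (Ne.symm hn)
      rw [minopLoop, if_pos hn]
      by_cases h10 : n < 10
      · simp only [if_pos ((len_one_iff n hnp).mpr h10)]
        have e1 : ¬ (n ≤ 0) := by omega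
        rw [fRef, dif_neg e1, dif_pos h10]
      · simp only [if_neg (fun hc => h10 ((len_one_iff n hnp).mp hc))]
        rw [m1_eq n hnp]
        have h1 : 1 ≤ mnat n.toNat := one_le_mnat _ (by omega)
        have h2 : mnat n.toNat ≤ 9 := mnat_le_nine n.toNat
        rw [ih _ _ (by omega) (by omega)]
        have e1 : ¬ (n ≤ 0) := by omega
        have e2 : ¬ (n < 10) := by omega
        rw [show fRef n = 1 + fRef (n - (mnat n.toNat : Int)) by
          rw [fRef, dif_neg e1, dif_neg e2]]
        ring

-- ===== B-side lemmas =====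

theorem inner_eq : ∀ (fuel : Nat) (t m : Int), 0 ≤ t → t.toNat ≤ fuel →
    maxDigitLoop fuel m t = ((Nat.digits 10 t.toNat).map (fun d : Nat => (d : Int))).foldl max m := by
  intro fuel
  induction fuel with
  | zero =>
    intro t m h0 hf
    have : t = 0 := by omega
    subst this
    rfl
  | succ fuel ih =>
    intro t m h0 hf
    by_cases ht : t = 0
    · subst ht; rfl
    · have htp : 0 < t := lt_of_le_of_ne h0 (Ne.symm ht)
      rw [maxDigitLoop, if_pos ht]
      have hc : t = ((t.toNat : Nat) : Int) := by omega
      have hm : PySem.Int.mod t 10 = ((t.toNat % 10 : Nat) : Int) := by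
        rw [hc]; exact_mod_cast PySem.Int.mod_natCast t.toNat 10
      have hd : PySem.Int.floordiv t 10 = ((t.toNat / 10 : Nat) : Int) := by
        rw [hc]; exact_mod_cast PySem.Int.floordiv_natCast t.toNat 10
      rw [hm, hd]
      rw [ih _ _ (by positivity) (by
        have := Nat.div_lt_self (show 0 < t.toNat by omega) (by norm_num : 1 < 10)
        simp only [Int.toNat_natCast]
        omega)]
      simp only [Int.toNat_natCast]
      rw [Nat.digits_def' (by norm_num : 1 < 10) (show 0 < t.toNat by omega)]
      simp only [List.map_cons, List.foldl_cons]
      congr 1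
      by_cases hlt : m < ((t.toNat % 10 : Nat) : Int)
      · rw [if_pos hlt, max_eq_right hlt.le]
      · rw [if_neg hlt, max_eq_left (by omega)]

theorem inner_mnat (h : Int) (hpos : 0 < h) :
    maxDigitLoop h.natAbs 0 h = ((mnat h.toNat : Nat) : Int) := by
  rw [inner_eq h.natAbs h 0 (by omega) (by omega)]
  rw [show (0 : Int) = ((0 : Nat) : Int) by rfl, castfold]
  rfl

-- max digit decomposes through the last digit
theorem mnat_decomp (H D : Nat) (hH : 0 < H) (hD : D ≤ 9) :
    mnat (10 * H + D) = max (mnat H) D := by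
  unfold mnat
  rw [Nat.digits_def' (by norm_num : 1 < 10) (by omega)]
  have h1 : (10 * H + D) % 10 = D := by omega
  have h2 : (10 * H + D) / 10 = H := by omega
  rw [h1, h2, List.foldl_cons]
  exact foldl_max_shift _ 0 D

theorem fRef_step (n : Int) (h : 10 ≤ n) : fRef n = 1 + fRef (n - (mnat n.toNat : Int)) := by
  rw [fRef, dif_neg (by omega), dif_neg (by omega)]

-- fRef at a value 10h+d with d ≤ max digit of h: the batch of d/M + 1 subtractions of M
theorem batch (h d : Int) (hh : 1 ≤ h) (hd0 : 0 ≤ d) (hd9 : d ≤ 9)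
    (hdM : d ≤ ((mnat h.toNat : Nat) : Int)) :
    fRef (10 * h + d)
      = (PySem.Int.floordiv d ((mnat h.toNat : Nat) : Int)) + 1
        + fRef (10 * (h - 1) + (PySem.Int.mod d ((mnat h.toNat : Nat) : Int)) + 10
            - ((mnat h.toNat : Nat) : Int)) := by
  set Mn := mnat h.toNat with hMn
  have hM1 : 1 ≤ Mn := one_le_mnat _ (by omega)
  have hM9 : Mn ≤ 9 := mnat_le_nine _
  have hcast : (10 * h + d).toNat = 10 * h.toNat + d.toNat := by omega
  have hmx : mnat (10 * h + d).toNat = Mn := by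
    rw [hcast, mnat_decomp h.toNat d.toNat (by omega) (by omega)]
    have : d.toNat ≤ Mn := by omega
    omega
  have hDiv : PySem.Int.floordiv d (Mn : Int) = ((d.toNat / Mn : Nat) : Int) := by
    rw [show d = ((d.toNat : Nat) : Int) by omega]
    exact_mod_cast PySem.Int.floordiv_natCast d.toNat Mn
  have hMod : PySem.Int.mod d (Mn : Int) = ((d.toNat % Mn : Nat) : Int) := by
    rw [show d = ((d.toNat : Nat) : Int) by omega]
    exact_mod_cast PySem.Int.mod_natCast d.toNat Mn
  rcases lt_or_eq_of_le hdM with hlt | heq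
  · -- d < M: a single subtraction crosses the decade
    have hdiv0 : d.toNat / Mn = 0 := Nat.div_eq_of_lt (by omega)
    have hmod0 : d.toNat % Mn = d.toNat := Nat.mod_eq_of_lt (by omega)
    rw [fRef_step _ (by omega), hmx, hDiv, hMod, hdiv0, hmod0]
    have : 10 * h + d - (Mn : Int) = 10 * (h - 1) + ((d.toNat : Nat) : Int) + 10 - (Mn : Int) := by
      omega
    rw [this]
    push_cast
    ring_nf
  · -- d = M: two subtractions (to the multiple of 10, then across)
    have hdiv1 : d.toNat / Mn = 1 := by
      have : d.toNat = Mn := by omega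
      rw [this, Nat.div_self (by omega)]
    have hmod0 : d.toNat % Mn = 0 := by
      have : d.toNat = Mn := by omega
      rw [this, Nat.mod_self]
    rw [fRef_step _ (by omega), hmx]
    have e1 : 10 * h + d - (Mn : Int) = 10 * h := by omega
    rw [e1]
    have hmx2 : mnat (10 * h).toNat = Mn := by
      have hc2 : (10 * h).toNat = 10 * h.toNat + 0 := by omega
      rw [hc2, mnat_decomp h.toNat 0 (by omega) (by omega)]
      omega
    rw [fRef_step (10 * h) (by omega), hmx2, hDiv, hMod, hdiv1, hmod0]
    have : 10 * h - (Mn : Int) = 10 * (h - 1) + ((0 : Nat) : Int) + 10 - (Mn : Int) := by omega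
    rw [this]
    push_cast
    ring_nf

-- loop invariant for B's outer loop
theorem lemB : ∀ (fuel : Nat) (h d op : Int), 0 ≤ h → 0 ≤ d → d ≤ 9 → 1 ≤ 10 * h + d →
    h.toNat ≤ fuel → altLoop fuel h d op = op + fRef (10 * h + d) - 1 := by
  intro fuel
  induction fuel with
  | zero =>
    intro h d op hh0 hd0 hd9 hpos hf
    have hz : h = 0 := by omega
    subst hz
    simp only [altLoop]
    rw [fRef, dif_neg (by omega), dif_pos (by omega)]
    ring
  | succ fuel ih =>
    intro h d op hh0 hd0 hd9 hpos hf
    by_cases hh : 0 < h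
    · rw [altLoop, if_pos hh]
      simp only []
      rw [inner_mnat h hh]
      set Mn := mnat h.toNat with hMn
      have hM1 : 1 ≤ Mn := one_le_mnat _ (by omega)
      have hM9 : Mn ≤ 9 := mnat_le_nine _
      -- value of d after the "if d > M" normalisation, and the extra step it costs
      by_cases hbig : ((Mn : Nat) : Int) < d
      · rw [if_pos hbig]
        simp only []
        -- one step subtracting d itself lands on 10*h
        have hmx : mnat (10 * h + d).toNat = d.toNat := by
          have hcast : (10 * h + d).toNat = 10 * h.toNat + d.toNat := by omega
          rw [hcast, mnat_decomp h.toNat d.toNat (by omega) (by omega)]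
          omega
        have hstep1 : fRef (10 * h + d) = 1 + fRef (10 * h + 0) := by
          rw [fRef_step _ (by omega), hmx]
          congr 1
          congr 1
          omega
        rw [hstep1, batch h 0 (by omega) (by omega) (by omega) (by exact_mod_cast Int.natCast_nonneg Mn)]
        have hD : PySem.Int.floordiv 0 ((Mn : Nat) : Int) = 0 := by
          have := PySem.Int.floordiv_natCast 0 Mn
          simpa using this
        have hMo : PySem.Int.mod 0 ((Mn : Nat) : Int) = 0 := by
          have := PySem.Int.mod_natCast 0 Mn
          simpa using this
        rw [hD, hMo]
        rw [ih (h - 1) (0 - (0 + 1) * (Mn : Int) + 10) (op + 1 + (0 + 1))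
          (by omega) (by omega) (by omega) (by omega) (by omega)]
        have e : 10 * (h - 1) + (0 - (0 + 1) * ((Mn : Nat) : Int) + 10)
            = 10 * (h - 1) + 0 + 10 - ((Mn : Nat) : Int) := by ring
        rw [e]
        ring
      · rw [if_neg hbig]
        simp only []
        have hdM : d ≤ ((Mn : Nat) : Int) := by omega
        rw [batch h d (by omega) hd0 hd9 hdM]
        have hDiv : PySem.Int.floordiv d (Mn : Int) = ((d.toNat / Mn : Nat) : Int) := by
          rw [show d = ((d.toNat : Nat) : Int) by omega]
          exact_mod_cast PySem.Int.floordiv_natCast d.toNat Mn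
        have hMod : PySem.Int.mod d (Mn : Int) = ((d.toNat % Mn : Nat) : Int) := by
          rw [show d = ((d.toNat : Nat) : Int) by omega]
          exact_mod_cast PySem.Int.mod_natCast d.toNat Mn
        have hdm := Nat.div_add_mod d.toNat Mn
        have hmlt : d.toNat % Mn < Mn := Nat.mod_lt _ (by omega)
        have hnewd : d - (PySem.Int.floordiv d ((Mn : Nat) : Int) + 1) * ((Mn : Nat) : Int) + 10
            = ((d.toNat % Mn : Nat) : Int) + 10 - ((Mn : Nat) : Int) := by
          rw [hDiv]
          have hqq : (((d.toNat / Mn : Nat) : Int) + 1) * ((Mn : Nat) : Int)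
              = ((d.toNat / Mn * Mn : Nat) : Int) + ((Mn : Nat) : Int) := by push_cast; ring
          rw [hqq]
          have hdm2 : d.toNat / Mn * Mn + d.toNat % Mn = d.toNat := Nat.div_add_mod' d.toNat Mn
          omega
        rw [hnewd]
        rw [ih (h - 1) (((d.toNat % Mn : Nat) : Int) + 10 - ((Mn : Nat) : Int)) _
          (by omega) (by omega) (by omega) (by omega) (by omega)]
        rw [hMod]
        have e : 10 * (h - 1) + (((d.toNat % Mn : Nat) : Int) + 10 - ((Mn : Nat) : Int))
            = 10 * (h - 1) + ((d.toNat % Mn : Nat) : Int) + 10 - ((Mn : Nat) : Int) := by ring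
        rw [e]
        ring
    · rw [altLoop, if_neg hh]
      have hz : h = 0 := by omega
      subst hz
      rw [fRef, dif_neg (by omega), dif_pos (by omega)]
      ring

-- ===== VERDICT (by name: the statement is the Claim_ definition above) =====
theorem minop_spec : Claim_equal_minop := by
  intro n _hd hpre
  unfold Spec_minop minop minop_alt
  have h0 : (0:Int) ≤ n := hpre
  rw [lemA (n.natAbs + 1) n 0 h0 (by omega)]
  by_cases hn : n = 0
  · subst hn; rw [if_pos rfl, fRef]; simp
  · rw [if_neg hn]
    simp only []
    have hD : PySem.Int.floordiv n 10 = ((n.toNat / 10 : Nat) : Int) := by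
      rw [show n = ((n.toNat : Nat) : Int) by omega]
      exact_mod_cast PySem.Int.floordiv_natCast n.toNat 10
    have hM : PySem.Int.mod n 10 = ((n.toNat % 10 : Nat) : Int) := by
      rw [show n = ((n.toNat : Nat) : Int) by omega]
      exact_mod_cast PySem.Int.mod_natCast n.toNat 10
    rw [hD, hM]
    rw [lemB _ _ _ _ (by omega) (by omega) (by omega) (by omega) (by omega)]
    have e : 10 * ((n.toNat / 10 : Nat) : Int) + ((n.toNat % 10 : Nat) : Int) = n := by omega
    rw [e]
    ring
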